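-- pv_equiv track=rewrite | github.com/officialcogniverse/mock_analyzer | python_service/main.py | _looks_generic
-- ===== SOURCE A (Python) =====
-- def _looks_generic(s: str) -> bool:
--     x = (s or "").lower()
--     bad = [
--         "practice more",
--         "revise",
--         "revision",
--         "study more",
--         "be confident",
--         "focus more",
--         "work harder",
--         "improve concepts",
--         "do more questions",
--         "keep practicing",
--     ]
--     return any(p in x for p in bad)
-- ===== SOURCE B (Python) =====
-- _PHRASES = (
--     "practice more",
--     "revise",
--     "revision",
--     "study more",
--     "be confident",
--     "focus more",
--     "work harder",
--     "improve concepts",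
--     "do more questions",
--     "keep practicing",
-- )
--
--
-- def _looks_generic(s: str) -> bool:
--     x = (s or "").lower()
--     # index the phrases by their first character, once
--     by_first = {}
--     for p in _PHRASES:
--         by_first.setdefault(p[0], []).append(p)
--     # single left-to-right scan: at each position only try phrases
--     # that start with the character found there
--     for i, c in enumerate(x):
--         for p in by_first.get(c, ()):
--             if x.startswith(p, i):
--                 return True
--     return False
-- ===== Notes on version B (the rewrite author's own statement) =====
-- stated objective: alternative
-- what changed: A runs ten independent substring searches (one 'p in x' per phrase); B builds a first-character index of the phrases once and makes a single left-to-right scan over the string, at each position testing only the phrases whose first character matches there.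
import Mathlib
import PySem

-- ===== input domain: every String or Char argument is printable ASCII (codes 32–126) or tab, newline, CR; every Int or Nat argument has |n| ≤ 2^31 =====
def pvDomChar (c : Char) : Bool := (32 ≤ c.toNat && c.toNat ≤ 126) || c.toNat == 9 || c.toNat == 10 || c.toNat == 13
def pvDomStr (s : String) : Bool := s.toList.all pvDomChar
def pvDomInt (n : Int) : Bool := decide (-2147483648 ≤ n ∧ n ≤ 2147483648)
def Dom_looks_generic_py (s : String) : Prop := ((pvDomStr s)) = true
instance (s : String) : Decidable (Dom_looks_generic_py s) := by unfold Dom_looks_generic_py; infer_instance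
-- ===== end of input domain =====

-- B replaces A's ten independent substring searches by one left-to-right scan with a
-- first-character index of the phrases (objective: alternative; return value only).

-- ===== PORT A =====
-- `(s or "").lower()` = `s.lower()` for a str argument (the empty string is the only falsy str
-- and lower "" = ""), so the port lowers s directly.
def looks_generic_py (s : String) : Bool :=
  let x := PySem.Str.lower s
  let bad : List String :=
    ["practice more", "revise", "revision", "study more", "be confident",
     "focus more", "work harder", "improve concepts", "do more questions",
     "keep practicing"]
  bad.any (fun p => PySem.Str.isIn p x)

-- ===== PORT B =====
def pvPhrases : List String :=
  ["practice more", "revise", "revision", "study more", "be confident",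
   "focus more", "work harder", "improve concepts", "do more questions",
   "keep practicing"]

-- p[0] for the (nonempty) phrase literals: exact as headD
def pvFirstChar (p : String) : Char := p.toList.headD ' '

-- by_first.setdefault(p[0], []).append(p) = modify at key p[0] with default [] appending p
def pvByFirst : PySem.Dict Char (List String) :=
  pvPhrases.foldl (fun d p => d.modify (pvFirstChar p) [] (fun l => l ++ [p])) PySem.Dict.empty

-- x.startswith(p, i) with 0 ≤ i: exact as isPrefixOf on the list dropped at i
def looks_generic_py_alt (s : String) : Bool :=
  let x := (PySem.Str.lower s).toList
  (PySem.List.enumerate x 0).any (fun ic =>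
    (pvByFirst.getD ic.2 []).any (fun p => p.toList.isPrefixOf (x.drop ic.1.toNat)))

-- ===== PRECONDITION & SPEC =====
def Spec_looks_generic_py (s : String) (out : Bool) : Prop := out = looks_generic_py_alt s
instance (s : String) (out : Bool) : Decidable (Spec_looks_generic_py s out) := by unfold Spec_looks_generic_py; infer_instance

-- ===== CLAIM (what is proved, stated in full; the proofs are below) =====
def Claim_equal_looks_generic_py : Prop := ∀ (s : String), Dom_looks_generic_py s → Spec_looks_generic_py s (looks_generic_py s)

-- ===== LEMMAS AND PROOFS =====

-- the grouping loop read back: the bucket at c holds exactly the phrases whose first char is c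
theorem pvByFirst_getD (c : Char) :
    pvByFirst.getD c [] = pvPhrases.filter (fun p => pvFirstChar p == c) := by
  have h : pvByFirst = (pvPhrases.map (fun p => (pvFirstChar p, p))).foldl
      (fun d q => d.modify q.1 [] (fun l => l ++ [q.2])) PySem.Dict.empty := by
    rw [List.foldl_map]
    rfl
  rw [h, PySem.Dict.getD_foldl_modify_append, PySem.Dict.getD_empty]
  simp [List.filter_map, Function.comp_def]

-- a nonempty pattern is an infix iff it is a prefix of some in-range drop
theorem pv_infix_iff {α : Type} (a : α) (t X : List α) :
    (a :: t) <:+: X ↔ ∃ k, ∃ _ : k < X.length, (a :: t) <+: X.drop k := by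
  constructor
  · rintro ⟨u, v, rfl⟩
    refine ⟨u.length, by simp only [List.length_append, List.length_cons]; omega, ?_⟩
    rw [List.append_assoc, List.drop_left]
    exact ⟨v, rfl⟩
  · rintro ⟨k, hk, w, hw⟩
    refine ⟨X.take k, w, ?_⟩
    rw [List.append_assoc, hw, List.take_append_drop]

-- the character at the match position is the pattern's first character
theorem pv_head_of_prefix_drop {α : Type} {a : α} {t X : List α} {k : Nat}
    (hk : k < X.length) (h : (a :: t) <+: X.drop k) : X[k] = a := by
  obtain ⟨w, hw⟩ := h
  have hd : X.drop k = a :: (t ++ w) := by rw [← hw]; simp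
  have h0 : (X.drop k)[0]'(by rw [hd]; simp) = a := by simp [hd]
  simpa using h0

theorem pvPhrases_ne_nil : ∀ p ∈ pvPhrases, p.toList ≠ [] := by decide

-- ===== VERDICT (by name: the statement is the Claim_ definition above) =====
theorem looks_generic_py_spec : Claim_equal_looks_generic_py := by
  intro s _
  unfold Spec_looks_generic_py
  rw [Bool.eq_iff_iff]
  simp only [looks_generic_py, looks_generic_py_alt, List.any_eq_true,
    PySem.Str.isIn_iff_infix, pvByFirst_getD, List.mem_filter,
    PySem.List.mem_enumerate_iff, beq_iff_eq, List.isPrefixOf_iff_prefix, zero_add, PySem.Str.toList_lower]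
  constructor
  · rintro ⟨p, hp, hinf⟩
    have hne : p.toList ≠ [] := pvPhrases_ne_nil p hp
    cases hpt : p.toList with
    | nil => exact absurd hpt hne
    | cons a t =>
      rw [hpt, pv_infix_iff] at hinf
      obtain ⟨k, hk, hpre⟩ := hinf
      have hXk := pv_head_of_prefix_drop hk hpre
      refine ⟨((k : Int), _), ⟨k, hk, rfl⟩, p, ⟨hp, ?_⟩, ?_⟩
      · simp [pvFirstChar, hpt, hXk]
      · simpa [hpt] using hpre
  · rintro ⟨ic, ⟨k, hk, rfl⟩, p, ⟨hp, _⟩, hpre⟩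
    refine ⟨p, hp, ?_⟩
    have hne : p.toList ≠ [] := pvPhrases_ne_nil p hp
    cases hpt : p.toList with
    | nil => exact absurd hpt hne
    | cons a t =>
      rw [pv_infix_iff]
      rw [hpt] at hpre
      exact ⟨k, hk, by simpa using hpre⟩
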